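-- pv_equiv track=rewrite | github.com/eyluo/playground | python/kDeletePalindrome.py | kDeletePalindrome
-- ===== SOURCE A (Python) =====
-- def isPalindrome(s):
--     return s == s[::-1]
--
-- def kDeletePalindrome(s, k):
--     def kdpHelper(s, k):
--         if (k == 0):
--             return isPalindrome(s)
--         for i in range(len(s)):
--             temp = s[0:i] + s[i + 1:]
--             result = kdpHelper(temp, k - 1)
--             if (result):
--                 return result
--         return False
--
--     return kdpHelper(s, k)
-- ===== SOURCE B (Python) =====
-- def kDeletePalindrome(s, k):
--     # True iff some subsequence of length n-k (i.e. after exactly k deletions)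
--     # is a palindrome, decided via the longest-palindromic-subsequence DP.
--     n = len(s)
--     if k < 0 or k > n:
--         return False
--     dp = [0] * (n + 1)  # dp[j] = LPS length of s[i+1:j]; starts as the row i = n
--     for i in range(n - 1, -1, -1):
--         new = [0] * (i + 1) + [1]  # new[j] = LPS length of s[i:j] for j <= i+1
--         for j in range(i + 2, n + 1):
--             best = max(dp[j], new[j - 1])
--             if s[i] == s[j - 1]:
--                 best = max(best, 2 + dp[j - 1])
--             new.append(best)
--         dp = new
--     return n - k <= dp[n]
-- ===== Notes on version B (the rewrite author's own statement) =====
-- stated objective: alternative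
-- what changed: A's depth-first search over all ordered sequences of k single-character deletions is replaced by the longest-palindromic-subsequence dynamic program: return True iff 0 <= k <= n and n - k <= LPS(s). The DP is O(n^2) by design, but a timing run could not confirm a speed label (A's early-exit search returns quickly on some inputs and times out on others), so none is claimed.
import Mathlib
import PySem

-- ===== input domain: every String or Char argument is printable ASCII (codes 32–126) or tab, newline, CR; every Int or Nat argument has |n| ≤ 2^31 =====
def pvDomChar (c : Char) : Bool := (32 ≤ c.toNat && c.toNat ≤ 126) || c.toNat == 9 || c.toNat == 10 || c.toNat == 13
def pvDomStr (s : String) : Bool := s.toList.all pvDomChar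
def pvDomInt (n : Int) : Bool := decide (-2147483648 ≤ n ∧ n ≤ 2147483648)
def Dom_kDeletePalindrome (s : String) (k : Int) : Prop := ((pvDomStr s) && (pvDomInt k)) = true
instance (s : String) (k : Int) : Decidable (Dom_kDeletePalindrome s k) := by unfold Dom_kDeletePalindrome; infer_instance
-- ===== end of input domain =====

-- B replaces A's depth-first search over all deletion sequences by the
-- longest-palindromic-subsequence dynamic program: the answer is True iff
-- 0 <= k <= n and n - k <= LPS(s); same return value everywhere.

-- ===== PORT A =====
-- isPalindrome: s == s[::-1]  (s[::-1] is reverse, PySem.List.slice?_none_none_neg_one)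
def pvIsPal (s : List Char) : Bool := s == s.reverse

-- temp = s[0:i] + s[i+1:]
def pvDel (s : List Char) (i : Nat) : List Char :=
  PySem.List.slice s (some 0) (some (i : Int)) ++ PySem.List.slice s (some ((i : Int) + 1)) none

theorem pvDel_length {s : List Char} {i : Nat} (h : i < s.length) :
    (pvDel s i).length = s.length - 1 := by
  simp [pvDel, PySem.List.slice_zero_start, PySem.List.slice_to_natCast]
  rw [show ((i : Int) + 1) = ((i + 1 : Nat) : Int) by push_cast; ring,
      PySem.List.slice_from_natCast]
  simp; omega

-- kdpHelper, transliterated; the for-loop with early return is List.any over range(len(s))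
def kdpHelperA (s : List Char) (k : Int) : Bool :=
  if k = 0 then pvIsPal s
  else (List.range s.length).attach.any (fun ⟨i, hi⟩ => kdpHelperA (pvDel s i) (k - 1))
termination_by s.length
decreasing_by
  have : i < s.length := List.mem_range.mp hi
  rw [pvDel_length this]; omega

def kDeletePalindrome (s : String) (k : Int) : Bool := kdpHelperA s.toList k

-- ===== PORT B =====
-- inner loop: for j in range(i+2, n+1): new.append(best)
-- (s[i], s[j-1] read with getD: both indices are in range on every reached iteration)
def pvRow (cs : List Char) (dp : List Nat) (i : Nat) : List Nat :=
  (List.range' (i + 2) (cs.length - (i + 1))).foldl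
    (fun new j =>
      let best := max (dp.getD j 0) (new.getD (j - 1) 0)
      let best := if cs.getD i ' ' == cs.getD (j - 1) ' ' then max best (2 + dp.getD (j - 1) 0) else best
      new ++ [best])
    (List.replicate (i + 1) 0 ++ [1])

-- for i in range(n-1, -1, -1): written as r = 0..n-1 with i = n-1-r
def kDeletePalindrome_alt (s : String) (k : Int) : Bool :=
  let cs := s.toList
  let n := cs.length
  if k < 0 ∨ (n : Int) < k then false
  else
    let dp := (List.range n).foldl (fun dp r => pvRow cs dp (n - 1 - r)) (List.replicate (n + 1) 0)
    decide ((n : Int) - k ≤ (dp.getD n 0 : Int))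

-- ===== PRECONDITION & SPEC =====
def Spec_kDeletePalindrome (s : String) (k : Int) (out : Bool) : Prop := out = kDeletePalindrome_alt s k
instance (s : String) (k : Int) (out : Bool) : Decidable (Spec_kDeletePalindrome s k out) := by unfold Spec_kDeletePalindrome; infer_instance

-- ===== CLAIM (what is proved, stated in full; the proofs are below) =====
def Claim_equal_kDeletePalindrome : Prop := ∀ (s : String) (k : Int), Dom_kDeletePalindrome s k → Spec_kDeletePalindrome s k (kDeletePalindrome s k)

-- ===== LEMMAS AND PROOFS =====

-- the mathematical LPS recurrence B's table computes: Lp cs i j = LPS length of cs[i:j]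
def Lp (cs : List Char) (i j : Nat) : Nat :=
  if j ≤ i then 0
  else if j = i + 1 then 1
  else if cs.getD i ' ' == cs.getD (j - 1) ' ' then
    max (max (Lp cs (i + 1) j) (Lp cs i (j - 1))) (2 + Lp cs (i + 1) (j - 1))
  else
    max (Lp cs (i + 1) j) (Lp cs i (j - 1))
termination_by j - i
decreasing_by all_goals omega

-- the slice cs[i:j]
def csub (cs : List Char) (i j : Nat) : List Char := (cs.drop i).take (j - i)

theorem csub_nil {cs : List Char} {i j : Nat} (h : j ≤ i) : csub cs i j = [] := by
  simp [csub, Nat.sub_eq_zero_of_le h]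

theorem csub_cons {cs : List Char} {i j : Nat} (hi : i < cs.length) (hij : i < j) :
    csub cs i j = cs.getD i ' ' :: csub cs (i + 1) j := by
  unfold csub
  rw [List.drop_eq_getElem_cons hi, List.getD_eq_getElem _ _ hi]
  rw [show j - i = (j - (i + 1)) + 1 by omega, List.take_succ_cons]

theorem csub_concat {cs : List Char} {i j : Nat} (hij : i < j) (hj : j ≤ cs.length) :
    csub cs i j = csub cs i (j - 1) ++ [cs.getD (j - 1) ' '] := by
  unfold csub
  rw [show j - i = (j - 1 - i) + 1 by omega, List.take_add_one]
  have h : j - 1 < cs.length := by omega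
  have : (cs.drop i)[j - 1 - i]? = some cs[j - 1] := by
    rw [List.getElem?_drop]
    rw [show i + (j - 1 - i) = j - 1 by omega]
    exact List.getElem?_eq_getElem h
  rw [this, List.getD_eq_getElem _ _ h]
  rfl

theorem csub_zero_len (cs : List Char) : csub cs 0 cs.length = cs := by
  simp [csub]

theorem kdpHelperA_neg : ∀ n (s : List Char), s.length ≤ n → ∀ k : Int, k < 0 → kdpHelperA s k = false := by
  intro n
  induction n with
  | zero =>
    intro s hs k hk
    have : s = [] := List.eq_nil_of_length_eq_zero (Nat.le_zero.mp hs)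
    subst this
    rw [kdpHelperA, if_neg (by omega)]
    simp
  | succ n ih =>
    intro s hs k hk
    rw [kdpHelperA, if_neg (by omega)]
    rw [List.any_eq_false]
    rintro ⟨i, hi⟩ _
    have hlt : i < s.length := List.mem_range.mp hi
    simp only
    rw [ih (pvDel s i) (by rw [pvDel_length hlt]; omega) (k - 1) (by omega)]
    simp

theorem pvDel_eq_eraseIdx (s : List Char) (i : Nat) : pvDel s i = s.eraseIdx i := by
  rw [List.eraseIdx_eq_take_drop_succ]
  simp [pvDel, PySem.List.slice_zero_start, PySem.List.slice_to_natCast]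
  rw [show ((i : Int) + 1) = ((i + 1 : Nat) : Int) by push_cast; ring,
      PySem.List.slice_from_natCast]

theorem exists_eraseIdx : ∀ (s y : List Char), y.Sublist s → y.length < s.length →
    ∃ i < s.length, y.Sublist (s.eraseIdx i) := by
  intro s
  induction s with
  | nil => intro y h hl; simp at hl
  | cons a s' ih =>
    intro y h hl
    rcases List.sublist_cons_iff.mp h with h' | ⟨r, rfl, hr⟩
    · exact ⟨0, by simp, by simpa using h'⟩
    · have hrl : r.length < s'.length := by simpa using hl
      rcases ih r hr hrl with ⟨i, hi, hsub⟩
      exact ⟨i + 1, by simpa using hi, by simpa using List.Sublist.cons₂ a hsub⟩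

-- characterization of A: exactly-m deletions reach a palindrome iff a palindromic
-- sublist of length (len - m) exists
theorem helperA_char : ∀ (m : Nat) (s : List Char),
    kdpHelperA s (m : Int) = true ↔
      ∃ y : List Char, y.reverse = y ∧ y.Sublist s ∧ y.length + m = s.length := by
  intro m
  induction m with
  | zero =>
    intro s
    rw [show ((0 : Nat) : Int) = 0 from rfl, kdpHelperA, if_pos rfl]
    simp only [pvIsPal, beq_iff_eq]
    constructor
    · intro h
      exact ⟨s, h.symm, List.Sublist.refl s, by simp⟩
    · rintro ⟨y, hpal, hsub, hlen⟩
      have : y = s := hsub.eq_of_length (by omega)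
      subst this
      exact hpal.symm ▸ rfl
  | succ m ih =>
    intro s
    rw [kdpHelperA, if_neg (by exact_mod_cast Nat.succ_ne_zero m)]
    rw [List.any_eq_true]
    have hcast : ((m + 1 : Nat) : Int) - 1 = (m : Int) := by push_cast; ring
    constructor
    · rintro ⟨⟨i, hi⟩, -, hx⟩
      have hlt : i < s.length := List.mem_range.mp hi
      simp only [hcast] at hx
      rcases (ih (pvDel s i)).mp hx with ⟨y, hpal, hsub, hlen⟩
      refine ⟨y, hpal, hsub.trans (pvDel_eq_eraseIdx s i ▸ List.eraseIdx_sublist s i), ?_⟩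
      rw [pvDel_length hlt] at hlen
      omega
    · rintro ⟨y, hpal, hsub, hlen⟩
      rcases exists_eraseIdx s y hsub (by omega) with ⟨i, hi, hsub'⟩
      refine ⟨⟨i, List.mem_range.mpr hi⟩, List.mem_attach _ _, ?_⟩
      simp only [hcast]
      rw [(ih (pvDel s i))]
      exact ⟨y, hpal, pvDel_eq_eraseIdx s i ▸ hsub', by rw [pvDel_length hi]; omega⟩

-- achievability: a palindromic sublist of cs[i:j] of length Lp cs i j exists
theorem Lp_ach : ∀ (d i j : Nat) (cs : List Char), j - i ≤ d → j ≤ cs.length →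
    ∃ y : List Char, y.reverse = y ∧ y.Sublist (csub cs i j) ∧ y.length = Lp cs i j := by
  intro d
  induction d with
  | zero =>
    intro i j cs h hj
    rw [Lp, if_pos (by omega)]
    exact ⟨[], rfl, List.nil_sublist _, rfl⟩
  | succ d ih =>
    intro i j cs h hj
    by_cases hji : j ≤ i
    · rw [Lp, if_pos hji]
      exact ⟨[], rfl, List.nil_sublist _, rfl⟩
    by_cases hj1 : j = i + 1
    · subst hj1
      rw [Lp, if_neg (by omega), if_pos rfl]
      have hi : i < cs.length := by omega
      refine ⟨[cs.getD i ' '], by simp, ?_, rfl⟩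
      rw [csub_cons hi (by omega), csub_nil (le_refl (i + 1))]
    -- j ≥ i + 2
    have hij2 : i + 2 ≤ j := by omega
    have hi : i < cs.length := by omega
    have hdecomp : csub cs i j = cs.getD i ' ' :: (csub cs (i + 1) (j - 1) ++ [cs.getD (j - 1) ' ']) := by
      rw [csub_cons hi (by omega), csub_concat (by omega : i + 1 < j) hj]
    rcases ih (i + 1) j cs (by omega) hj with ⟨ya, hap, has, hal⟩
    rcases ih i (j - 1) cs (by omega) (by omega) with ⟨yb, hbp, hbs, hbl⟩
    rcases ih (i + 1) (j - 1) cs (by omega) (by omega) with ⟨yc, hcp, hcs', hcl⟩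
    have hsub_a : ya.Sublist (csub cs i j) := by
      rw [csub_cons hi (by omega)]; exact has.cons _
    have hsub_b : yb.Sublist (csub cs i j) := by
      rw [csub_concat (by omega : i < j) hj]
      exact hbs.trans (List.sublist_append_left _ _)
    rw [Lp, if_neg (by omega), if_neg hj1]
    by_cases heq : cs.getD i ' ' == cs.getD (j - 1) ' '
    · rw [if_pos heq]
      have heq' : cs.getD i ' ' = cs.getD (j - 1) ' ' := by simpa using heq
      rcases max_choice (max (Lp cs (i + 1) j) (Lp cs i (j - 1))) (2 + Lp cs (i + 1) (j - 1)) with hm | hm <;> rw [hm]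
      · rcases max_choice (Lp cs (i + 1) j) (Lp cs i (j - 1)) with hm2 | hm2 <;> rw [hm2]
        · exact ⟨ya, hap, hsub_a, hal⟩
        · exact ⟨yb, hbp, hsub_b, hbl⟩
      · refine ⟨cs.getD i ' ' :: yc ++ [cs.getD i ' '], by simp [hcp], ?_, by simp; omega⟩
        rw [hdecomp]
        refine List.Sublist.cons₂ _ (hcs'.append ?_)
        rw [heq']
    · rw [if_neg heq]
      rcases max_choice (Lp cs (i + 1) j) (Lp cs i (j - 1)) with hm2 | hm2 <;> rw [hm2]
      · exact ⟨ya, hap, hsub_a, hal⟩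
      · exact ⟨yb, hbp, hsub_b, hbl⟩

theorem Lp_pos : ∀ (d i j : Nat) (cs : List Char), j - i ≤ d → i < j → 1 ≤ Lp cs i j := by
  intro d
  induction d with
  | zero => intro i j cs h hij; omega
  | succ d ih =>
    intro i j cs h hij
    rw [Lp, if_neg (by omega)]
    by_cases hj : j = i + 1
    · simp [hj]
    · rw [if_neg hj]
      have hb : 1 ≤ Lp cs i (j - 1) := ih i (j - 1) cs (by omega) (by omega)
      split
      · exact le_trans (le_trans hb (le_max_right _ _)) (le_max_left _ _)
      · exact le_trans hb (le_max_right _ _)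

theorem Lp_le_left {cs : List Char} {i j : Nat} (h : i + 2 ≤ j) :
    Lp cs (i + 1) j ≤ Lp cs i j := by
  conv_rhs => rw [Lp, if_neg (by omega : ¬ j ≤ i), if_neg (by omega : ¬ j = i + 1)]
  split
  · exact le_trans (le_max_left _ _) (le_max_left _ _)
  · exact le_max_left _ _

theorem Lp_le_right {cs : List Char} {i j : Nat} (h : i + 2 ≤ j) :
    Lp cs i (j - 1) ≤ Lp cs i j := by
  conv_rhs => rw [Lp, if_neg (by omega : ¬ j ≤ i), if_neg (by omega : ¬ j = i + 1)]
  split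
  · exact le_trans (le_max_right _ _) (le_max_left _ _)
  · exact le_max_right _ _

theorem sublist_concat_decomp {l z : List Char} {e : Char} (h : l.Sublist (z ++ [e])) :
    l.Sublist z ∨ ∃ w, l = w ++ [e] ∧ w.Sublist z := by
  rcases (List.sublist_append_iff).mp h with ⟨a, b, rfl, ha, hb⟩
  rcases List.sublist_singleton.mp hb with rfl | rfl
  · exact Or.inl (by simpa using ha)
  · exact Or.inr ⟨a, rfl, ha⟩

theorem pal_decomp {y : List Char} (hp : y.reverse = y) (h2 : 2 ≤ y.length) :
    ∃ c mid, y = c :: mid ++ [c] ∧ mid.reverse = mid := by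
  rcases y with _ | ⟨c, t⟩
  · simp at h2
  rcases t.eq_nil_or_concat with rfl | ⟨mid, d, rfl⟩
  · simp at h2
  have hrev : d :: (mid.reverse ++ [c]) = c :: (mid ++ [d]) := by
    simpa [List.concat_eq_append] using hp
  have hd : d = c := (List.cons.inj hrev).1
  subst hd
  have hmid : mid.reverse ++ [d] = mid ++ [d] := (List.cons.inj hrev).2
  have hm : mid.reverse = mid := by simpa using hmid
  exact ⟨d, mid, by simp [List.concat_eq_append], hm⟩

-- optimality: every palindromic sublist of cs[i:j] has length at most Lp cs i j
theorem Lp_opt : ∀ (d i j : Nat) (cs : List Char), j - i ≤ d → j ≤ cs.length →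
    ∀ y : List Char, y.reverse = y → y.Sublist (csub cs i j) → y.length ≤ Lp cs i j := by
  intro d
  induction d with
  | zero =>
    intro i j cs h hj y hp hs
    have : csub cs i j = [] := csub_nil (by omega)
    rw [this] at hs
    have : y = [] := List.sublist_nil.mp hs
    simp [this]
  | succ d ih =>
    intro i j cs h hj y hp hs
    by_cases hji : j ≤ i
    · rw [csub_nil hji] at hs
      have : y = [] := List.sublist_nil.mp hs
      simp [this]
    by_cases hj1 : j = i + 1
    · subst hj1
      rw [Lp, if_neg (by omega), if_pos rfl]
      rw [csub_cons (by omega) (by omega), csub_nil (le_refl (i + 1))] at hs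
      rcases List.sublist_singleton.mp hs with rfl | rfl <;> simp
    -- j ≥ i + 2
    have hij2 : i + 2 ≤ j := by omega
    have hi : i < cs.length := by omega
    have hpos : 1 ≤ Lp cs i j := Lp_pos (j - i) i j cs le_rfl (by omega)
    rw [csub_cons hi (by omega)] at hs
    rcases List.sublist_cons_iff.mp hs with hs' | ⟨t, rfl, ht⟩
    · -- y inside cs[i+1:j]
      have := ih (i + 1) j cs (by omega) hj y hp hs'
      exact le_trans this (Lp_le_left hij2)
    · -- y = cs[i] :: t with t <+ cs[i+1:j]
      rcases t.eq_nil_or_concat with rfl | ⟨mid0, d0, hcat⟩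
      · simpa using hpos
      have h2 : 2 ≤ (cs.getD i ' ' :: t).length := by
        subst hcat; simp
      rcases pal_decomp hp h2 with ⟨c, mid, hy, hmid⟩
      have hc : c = cs.getD i ' ' := by
        have := congrArg (fun l => l.headD ' ') hy
        simpa using this.symm
      have htm : t = mid ++ [c] := (List.cons.inj hy).2
      subst htm
      rw [csub_concat (by omega : i + 1 < j) hj] at ht
      rcases sublist_concat_decomp ht with hcase | ⟨w, hw, hws⟩
      · -- mid ++ [c] inside cs[i+1:j-1]; so y <+ cs[i:j-1]
        have hysub : (cs.getD i ' ' :: (mid ++ [c])).Sublist (csub cs i (j - 1)) := by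
          rw [csub_cons hi (by omega : i < j - 1), ← hc]
          exact hcase.cons₂ _
        have hle := ih i (j - 1) cs (by omega) (by omega) (cs.getD i ' ' :: (mid ++ [c])) hp hysub
        exact le_trans hle (Lp_le_right hij2)
      · -- last char matches: c = cs[j-1], middle inside cs[i+1:j-1]
        have hlast : c = cs.getD (j - 1) ' ' := by
          rcases List.append_inj' hw (by simp) with ⟨-, h2'⟩
          simpa using h2'
        have heq : (cs.getD i ' ' == cs.getD (j - 1) ' ') = true := by
          rw [← hlast, ← hc]; simp
        obtain ⟨hwm, -⟩ := List.append_inj' hw (by simp)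
        subst hwm
        have hmle := ih (i + 1) (j - 1) cs (by omega) (by omega) mid hmid hws
        rw [Lp, if_neg (by omega), if_neg hj1, if_pos heq]
        have hylen : (cs.getD i ' ' :: (mid ++ [c])).length = mid.length + 2 := by simp
        rw [hylen]
        have := le_max_right (max (Lp cs (i + 1) j) (Lp cs i (j - 1))) (2 + Lp cs (i + 1) (j - 1))
        omega

-- a palindrome has palindromic sublists of every smaller length
theorem pal_shrink : ∀ (d : Nat) (y : List Char), y.length ≤ d → y.reverse = y →
    ∀ l ≤ y.length, ∃ z : List Char, z.reverse = z ∧ z.Sublist y ∧ z.length = l := by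
  intro d
  induction d with
  | zero =>
    intro y hy _ l hl
    exact ⟨[], rfl, List.nil_sublist y, by simp; omega⟩
  | succ d ih =>
    intro y hy hp l hl
    by_cases hly : l = y.length
    · exact ⟨y, hp, List.Sublist.refl y, hly.symm⟩
    by_cases hy1 : y.length ≤ 1
    · exact ⟨[], rfl, List.nil_sublist y, by simp; omega⟩
    rcases pal_decomp hp (by omega) with ⟨c, mid, rfl, hmid⟩
    have hylen : (c :: mid ++ [c]).length = mid.length + 2 := by simp
    have hmid_sub : mid.Sublist (c :: mid ++ [c]) :=
      ((List.sublist_append_left mid [c]).cons c)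
    by_cases hlm : l ≤ mid.length
    · rcases ih mid (by omega) hmid l hlm with ⟨z, h1, h2, h3⟩
      exact ⟨z, h1, h2.trans hmid_sub, h3⟩
    · have hl1 : l = mid.length + 1 := by omega
      by_cases hm0 : mid.length = 0
      · exact ⟨[c], by simp, by simp [List.Sublist.cons₂ c (List.nil_sublist (mid ++ [c]))], by simp; omega⟩
      · rcases ih mid (by omega) hmid (mid.length - 1) (by omega) with ⟨z, h1, h2, h3⟩
        refine ⟨c :: z ++ [c], by simp [h1], ?_, by simp; omega⟩
        exact List.Sublist.cons₂ c (h2.append (List.Sublist.refl [c]))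

-- the table rows compute Lp
def RowOK (cs : List Char) (i : Nat) (dp : List Nat) : Prop :=
  dp.length = cs.length + 1 ∧ ∀ j ≤ cs.length, dp.getD j 0 = Lp cs i j

-- the inner-loop body of pvRow, named for the proofs
def rowF (cs : List Char) (dp : List Nat) (i : Nat) : List Nat → Nat → List Nat :=
  fun new j =>
    let best := max (dp.getD j 0) (new.getD (j - 1) 0)
    let best := if cs.getD i ' ' == cs.getD (j - 1) ' ' then max best (2 + dp.getD (j - 1) 0) else best
    new ++ [best]

theorem pvRow_eq (cs : List Char) (dp : List Nat) (i : Nat) :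
    pvRow cs dp i =
      (List.range' (i + 2) (cs.length - (i + 1))).foldl (rowF cs dp i)
        (List.replicate (i + 1) 0 ++ [1]) := rfl

theorem pvRow_inner {cs : List Char} {dp : List Nat} {i : Nat}
    (h : RowOK cs (i + 1) dp) : ∀ m, i + 2 + m ≤ cs.length + 1 →
    ((List.range' (i + 2) m).foldl (rowF cs dp i) (List.replicate (i + 1) 0 ++ [1])).length
        = i + 2 + m ∧
      ∀ j < i + 2 + m,
        ((List.range' (i + 2) m).foldl (rowF cs dp i)
          (List.replicate (i + 1) 0 ++ [1])).getD j 0 = Lp cs i j := by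
  intro m
  induction m with
  | zero =>
    intro _
    rw [show List.range' (i + 2) 0 = [] from rfl, List.foldl_nil]
    constructor
    · simp
    · intro j hj
      by_cases hji : j ≤ i
      · rw [Lp, if_pos hji, List.getD_append _ _ _ _ (by simp; omega),
          List.getD_replicate _ (by omega)]
      · have hj1 : j = i + 1 := by omega
        subst hj1
        rw [Lp, if_neg (by omega), if_pos rfl,
          List.getD_append_right _ _ _ _ (by simp)]
        simp
  | succ m ih =>
    intro hm
    have hm' : i + 2 + m ≤ cs.length + 1 := by omega
    obtain ⟨ihlen, ihval⟩ := ih hm'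
    rw [List.range'_concat, List.foldl_append, List.foldl_cons, List.foldl_nil]
    set M := (List.range' (i + 2) m).foldl (rowF cs dp i) (List.replicate (i + 1) 0 ++ [1]) with hM
    set j := i + 2 + 1 * m with hj
    have hj' : j = i + 2 + m := by omega
    have hjn : j ≤ cs.length := by omega
    have hbest : rowF cs dp i M j = M ++ [Lp cs i j] := by
      unfold rowF
      have e1 : dp.getD j 0 = Lp cs (i + 1) j := h.2 j hjn
      have e2 : M.getD (j - 1) 0 = Lp cs i (j - 1) := by
        rw [hj']
        have := ihval (i + 1 + m) (by omega)
        simpa [show i + 2 + m - 1 = i + 1 + m by omega] using this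
      have e3 : dp.getD (j - 1) 0 = Lp cs (i + 1) (j - 1) := h.2 (j - 1) (by omega)
      rw [e1, e2, e3]
      conv_rhs => rw [Lp, if_neg (by omega : ¬ j ≤ i), if_neg (by omega : ¬ j = i + 1)]
    rw [hbest]
    constructor
    · simp [ihlen]; omega
    · intro t ht
      by_cases htj : t < i + 2 + m
      · rw [List.getD_append _ _ _ _ (by omega), ihval t htj]
      · have : t = j := by omega
        subst this
        rw [List.getD_append_right _ _ _ _ (by omega)]
        simp [ihlen, hj']

theorem pvRow_ok {cs : List Char} {dp : List Nat} {i : Nat} (hi : i < cs.length)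
    (h : RowOK cs (i + 1) dp) : RowOK cs i (pvRow cs dp i) := by
  obtain ⟨hlen, hval⟩ := pvRow_inner h (cs.length - (i + 1)) (by omega)
  rw [pvRow_eq]
  exact ⟨by rw [hlen]; omega, fun j hj => hval j (by omega)⟩

theorem dp_final (cs : List Char) :
    ((List.range cs.length).foldl (fun dp r => pvRow cs dp (cs.length - 1 - r))
      (List.replicate (cs.length + 1) 0)).getD cs.length 0 = Lp cs 0 cs.length := by
  have rows : ∀ r ≤ cs.length, RowOK cs (cs.length - r)
      ((List.range r).foldl (fun dp r' => pvRow cs dp (cs.length - 1 - r'))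
        (List.replicate (cs.length + 1) 0)) := by
    intro r
    induction r with
    | zero =>
      intro _
      rw [List.range_zero, List.foldl_nil]
      refine ⟨by simp, fun j hj => ?_⟩
      rw [List.getD_replicate _ (by omega), Lp, if_pos (by omega)]
    | succ r ih =>
      intro hr
      rw [List.range_succ, List.foldl_append, List.foldl_cons, List.foldl_nil]
      have hprev := ih (by omega)
      have hi : cs.length - 1 - r < cs.length := by omega
      have hsucc : cs.length - 1 - r + 1 = cs.length - r := by omega
      have heq : cs.length - 1 - r = cs.length - (r + 1) := by omega
      rw [heq]
      refine pvRow_ok (heq ▸ hi) ?_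
      rw [show cs.length - (r + 1) + 1 = cs.length - r by omega]
      exact hprev
  have := rows cs.length le_rfl
  rw [Nat.sub_self] at this
  exact this.2 cs.length le_rfl

-- ===== VERDICT (by name: the statement is the Claim_ definition above) =====
theorem kDeletePalindrome_spec : Claim_equal_kDeletePalindrome := by
  intro s k _
  unfold Spec_kDeletePalindrome kDeletePalindrome kDeletePalindrome_alt
  set cs := s.toList with hcs
  by_cases hk : k < 0
  · rw [if_pos (Or.inl hk)]
    exact kdpHelperA_neg cs.length cs le_rfl k hk
  · have hkk : k = (k.toNat : Int) := by omega
    by_cases hbig : (cs.length : Int) < k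
    · rw [if_pos (Or.inr hbig)]
      rw [hkk]
      rw [Bool.eq_false_iff]
      intro htrue
      rcases (helperA_char k.toNat cs).mp htrue with ⟨y, -, -, hlen⟩
      omega
    · rw [if_neg (by tauto)]
      show kdpHelperA cs k = decide ((cs.length : Int) - k ≤ (((List.range cs.length).foldl (fun dp r => pvRow cs dp (cs.length - 1 - r)) (List.replicate (cs.length + 1) 0)).getD cs.length 0 : Int))
      rw [dp_final cs, hkk]
      rw [Bool.eq_iff_iff, helperA_char, decide_eq_true_iff]
      have hm : k.toNat ≤ cs.length := by omega
      constructor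
      · rintro ⟨y, hpal, hsub, hlen⟩
        have := Lp_opt cs.length 0 cs.length cs (by omega) le_rfl y hpal (by rwa [csub_zero_len])
        omega
      · intro hle
        rcases Lp_ach cs.length 0 cs.length cs (by omega) le_rfl with ⟨Y, hYpal, hYsub, hYlen⟩
        have hlen' : cs.length - k.toNat ≤ Y.length := by omega
        rcases pal_shrink Y.length Y le_rfl hYpal (cs.length - k.toNat) hlen' with ⟨z, hzp, hzs, hzl⟩
        refine ⟨z, hzp, hzs.trans (by rwa [csub_zero_len] at hYsub), by omega⟩
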